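-- pv_equiv track=rewrite | github.com/FilipJaskovic/Latex-sympy.nvim | server.py | _split_equation_inputs
-- ===== SOURCE A (Python) =====
-- def _split_equation_inputs(text: str) -> list[str]:
--     parts: list[str] = []
--     normalized = text.replace("\r\n", "\n").replace("\r", "\n")
--     for line in normalized.split("\n"):
--         for segment in line.split(";"):
--             candidate = segment.strip()
--             if candidate:
--                 parts.append(candidate)
--     return parts
-- ===== SOURCE B (Python) =====
-- def _split_equation_inputs(text: str) -> list[str]:
--     # Single-pass state machine over the characters: accumulate the current
--     # segment, flush (strip, keep if non-empty) whenever a delimiter is seen,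
--     # and flush once more at the end.  No replace()/split() passes at all.
--     parts: list[str] = []
--     cur: list[str] = []
--     for ch in text:
--         if ch == "\r" or ch == "\n" or ch == ";":
--             seg = "".join(cur).strip()
--             if seg:
--                 parts.append(seg)
--             cur = []
--         else:
--             cur.append(ch)
--     seg = "".join(cur).strip()
--     if seg:
--         parts.append(seg)
--     return parts
-- ===== Notes on version B (the rewrite author's own statement) =====
-- stated objective: alternative
-- what changed: Replaces the normalize-then-nested-split pipeline (two replace() passes plus line/segment split loops) by a single character-by-character state machine that keeps an explicit current-segment accumulator and flushes a stripped non-empty segment at each delimiter and at end of input.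
import Mathlib
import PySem

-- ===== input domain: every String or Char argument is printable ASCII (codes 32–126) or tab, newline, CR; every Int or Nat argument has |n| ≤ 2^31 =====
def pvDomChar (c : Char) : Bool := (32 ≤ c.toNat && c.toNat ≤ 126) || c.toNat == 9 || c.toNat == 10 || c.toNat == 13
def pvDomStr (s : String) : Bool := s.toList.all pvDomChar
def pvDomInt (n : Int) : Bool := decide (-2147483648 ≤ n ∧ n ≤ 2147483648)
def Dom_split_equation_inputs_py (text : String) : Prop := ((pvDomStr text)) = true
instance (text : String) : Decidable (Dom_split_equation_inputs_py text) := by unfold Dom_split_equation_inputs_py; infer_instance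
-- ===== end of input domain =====

-- B replaces A's two replace() normalizations and nested line/segment split loops by a
-- single-pass character state machine with an explicit current-segment accumulator.


-- ===== PORT A =====
def split_equation_inputs_py (text : String) : List String :=
  let normalized := PySem.Chars.replace (PySem.Chars.replace text.toList ['\r', '\n'] ['\n']) ['\r'] ['\n']
  (PySem.Chars.splitOn normalized ['\n']).foldl (fun parts line =>
    (PySem.Chars.splitOn line [';']).foldl (fun parts segment =>
      let candidate := PySem.Chars.strip segment
      if candidate ≠ [] then parts ++ [String.ofList candidate] else parts) parts) []

-- ===== PORT B =====
-- the loop body: on a delimiter flush the stripped accumulator, otherwise extend it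
def pvStepB (st : List String × List Char) (ch : Char) : List String × List Char :=
  if ch == '\r' || ch == '\n' || ch == ';' then
    let seg := PySem.Chars.strip st.2
    (if seg ≠ [] then st.1 ++ [String.ofList seg] else st.1, [])
  else
    (st.1, st.2 ++ [ch])

def split_equation_inputs_py_alt (text : String) : List String :=
  let st := text.toList.foldl pvStepB ([], [])
  let seg := PySem.Chars.strip st.2
  if seg ≠ [] then st.1 ++ [String.ofList seg] else st.1

-- ===== PRECONDITION & SPEC =====
def Spec_split_equation_inputs_py (text : String) (out : List String) : Prop := out = split_equation_inputs_py_alt text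
instance (text : String) (out : List String) : Decidable (Spec_split_equation_inputs_py text out) := by unfold Spec_split_equation_inputs_py; infer_instance

-- ===== CLAIM (what is proved, stated in full; the proofs are below) =====
def Claim_equal_split_equation_inputs_py : Prop := ∀ (text : String), Dom_split_equation_inputs_py text → Spec_split_equation_inputs_py text (split_equation_inputs_py text)

-- ===== LEMMAS AND PROOFS =====

-- the unified delimiter predicate
def pvDelim (c : Char) : Bool := c == '\r' || c == '\n' || c == ';'

-- recursive characterization of text.replace("\r\n", "\n")
def pvRep2 : List Char → List Char
  | [] => []
  | '\r' :: '\n' :: t => '\n' :: pvRep2 t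
  | c :: t => c :: pvRep2 t

-- "keep": strip every segment, keep the non-empty results, as strings
def pvKeep (segs : List (List Char)) : List String :=
  ((segs.map (fun piece => PySem.Chars.strip piece)).filter (fun c => c ≠ [])).map String.ofList

lemma pvKeep_cons (x : List Char) (L : List (List Char)) :
    pvKeep (x :: L) =
      (if PySem.Chars.strip x ≠ [] then [String.ofList (PySem.Chars.strip x)] else []) ++ pvKeep L := by
  simp only [pvKeep, List.map_cons, List.filter_cons]
  split_ifs <;> simp_all

lemma pvKeep_append (X Y : List (List Char)) : pvKeep (X ++ Y) = pvKeep X ++ pvKeep Y := by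
  simp [pvKeep]

lemma strip_nil : PySem.Chars.strip [] = [] := by
  simp [PySem.Chars.strip, PySem.Chars.lstrip, PySem.Chars.rstrip]

lemma pvRep2_cons_ne (c : Char) (t : List Char) (h : ¬(c = '\r' ∧ t.head? = some '\n')) :
    pvRep2 (c :: t) = c :: pvRep2 t := by
  rw [pvRep2.eq_def]
  split
  · simp_all
  · rename_i heq; simp at heq; simp_all
  · rename_i heq; cases heq; rfl

-- splitOn with a one-character separator is splitOnP
lemma splitOn_go_single (s : Char) :
    ∀ fuel (l cur : List Char) (acc : List (List Char)), l.length ≤ fuel →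
      PySem.Chars.splitOn.go [s] fuel l cur acc =
        acc.reverse ++ (List.splitOnP (· == s) l).modifyHead (cur.reverse ++ ·) := by
  intro fuel
  induction fuel with
  | zero =>
    intro l cur acc hl
    have : l = [] := by simpa using hl
    subst this
    rw [PySem.Chars.splitOn.go.eq_def]
    simp [List.splitOnP_nil]
  | succ n ih =>
    intro l cur acc hl
    cases l with
    | nil =>
      rw [PySem.Chars.splitOn.go.eq_def]
      simp [List.splitOnP_nil]
    | cons c t =>
      rw [PySem.Chars.splitOn.go.eq_def]
      simp only []
      by_cases hc : c = s
      · subst hc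
        have hpre : List.isPrefixOf [c] (c :: t) = true := by simp [List.isPrefixOf]
        rw [if_pos hpre]
        simp only [List.length_cons, List.drop_succ_cons, List.length_nil, List.drop_zero]
        rw [ih t [] (cur.reverse :: acc) (Nat.le_of_succ_le_succ (by simpa using hl))]
        simp [List.splitOnP_cons]
        exact congrFun List.modifyHead_id _
      · have hpre : List.isPrefixOf [s] (c :: t) = false := by
          simp [List.isPrefixOf]; exact fun h => (hc h.symm).elim
        rw [if_neg (by simp [hpre])]
        rw [ih t (c :: cur) acc (Nat.le_of_succ_le_succ (by simpa using hl))]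
        rw [List.splitOnP_cons]
        rw [if_neg (by simp [hc])]
        rw [List.modifyHead_modifyHead]
        rcases hsp : List.splitOnP (· == s) t with _ | ⟨h0, t0⟩
        · exact absurd hsp (List.splitOnP_ne_nil _ _)
        · simp [Function.comp]

lemma splitOn_single (l : List Char) (s : Char) :
    PySem.Chars.splitOn l [s] = List.splitOnP (· == s) l := by
  rw [PySem.Chars.splitOn]
  rw [splitOn_go_single s (l.length + 1) l [] [] (Nat.le_succ _)]
  rcases hsp : List.splitOnP (· == s) l with _ | ⟨h0, t0⟩
  · exact absurd hsp (List.splitOnP_ne_nil _ _)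
  · simp

-- replace with a one-character pattern is a character map
lemma replace_single_go (a b : Char) :
    ∀ fuel (l acc : List Char), l.length ≤ fuel →
      PySem.Chars.replace.go [a] [b] fuel l acc =
        acc.reverse ++ l.map (fun c => if c == a then b else c) := by
  intro fuel
  induction fuel with
  | zero =>
    intro l acc hl
    have : l = [] := by simpa using hl
    subst this
    rw [PySem.Chars.replace.go.eq_def]; simp
  | succ n ih =>
    intro l acc hl
    cases l with
    | nil => rw [PySem.Chars.replace.go.eq_def]; simp
    | cons c t =>
      rw [PySem.Chars.replace.go.eq_def]
      simp only []
      by_cases hc : c = a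
      · subst hc
        rw [if_pos (by simp [List.isPrefixOf])]
        simp only [List.length_cons, List.drop_succ_cons, List.length_nil, List.drop_zero]
        rw [ih t ([b].reverse ++ acc) (Nat.le_of_succ_le_succ (by simpa using hl))]
        simp
      · rw [if_neg (by simp [List.isPrefixOf]; exact fun h => (hc h.symm).elim)]
        rw [ih t (c :: acc) (Nat.le_of_succ_le_succ (by simpa using hl))]
        simp [hc]

lemma replace_single (l : List Char) (a b : Char) :
    PySem.Chars.replace l [a] [b] = l.map (fun c => if c == a then b else c) := by
  rw [PySem.Chars.replace]
  rw [if_neg (by simp)]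
  rw [replace_single_go a b l.length l [] (le_refl _)]
  simp

-- replace("\r\n", "\n") is pvRep2
lemma replace_crlf_go :
    ∀ fuel (l acc : List Char), l.length ≤ fuel →
      PySem.Chars.replace.go ['\r', '\n'] ['\n'] fuel l acc = acc.reverse ++ pvRep2 l := by
  intro fuel
  induction fuel with
  | zero =>
    intro l acc hl
    have : l = [] := by simpa using hl
    subst this
    rw [PySem.Chars.replace.go.eq_def]; simp [pvRep2]
  | succ n ih =>
    intro l acc hl
    cases l with
    | nil => rw [PySem.Chars.replace.go.eq_def]; simp [pvRep2]
    | cons c t =>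
      rw [PySem.Chars.replace.go.eq_def]
      simp only []
      by_cases hpre : List.isPrefixOf ['\r', '\n'] (c :: t) = true
      · rw [if_pos hpre]
        obtain ⟨hc, t', ht⟩ : c = '\r' ∧ ∃ t', t = '\n' :: t' := by
          cases t with
          | nil => simp [List.isPrefixOf] at hpre
          | cons d t' =>
            simp [List.isPrefixOf] at hpre
            exact ⟨hpre.1.symm, t', by rw [hpre.2.symm]⟩
        subst hc; subst ht
        simp only [List.length_cons, List.drop_succ_cons, List.length_nil, List.drop_zero]
        rw [ih t' (['\n'].reverse ++ acc) (by simp at hl; omega)]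
        simp [pvRep2]
      · rw [if_neg hpre]
        rw [ih t (c :: acc) (Nat.le_of_succ_le_succ (by simpa using hl))]
        rw [pvRep2_cons_ne c t (by
          rintro ⟨hc, hd⟩
          subst hc
          cases t with
          | nil => simp at hd
          | cons d t' => simp at hd; subst hd; simp [List.isPrefixOf] at hpre)]
        simp

lemma replace_crlf (l : List Char) :
    PySem.Chars.replace l ['\r', '\n'] ['\n'] = pvRep2 l := by
  rw [PySem.Chars.replace]
  rw [if_neg (by simp)]
  rw [replace_crlf_go l.length l [] (le_refl _)]
  simp

-- splitOnP commutes with a character map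
lemma splitOnP_map (p : Char → Bool) (f : Char → Char) (l : List Char) :
    List.splitOnP p (l.map f) = (List.splitOnP (fun c => p (f c)) l).map (List.map f) := by
  induction l with
  | nil => simp [List.splitOnP_nil]
  | cons c t ih =>
    simp only [List.map_cons, List.splitOnP_cons, ih]
    by_cases h : p (f c)
    · simp [h]
    · simp only [h, Bool.false_eq_true]
      rcases hsp : List.splitOnP (fun c => p (f c)) t with _ | ⟨h0, t0⟩
      · exact absurd hsp (List.splitOnP_ne_nil _ _)
      · simp

-- every element of every piece of splitOnP p l falsifies p
lemma splitOnP_sep_free (p : Char → Bool) (l : List Char) :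
    ∀ piece ∈ List.splitOnP p l, ∀ x ∈ piece, p x = false := by
  induction l with
  | nil => simp [List.splitOnP_nil]
  | cons c t ih =>
    rw [List.splitOnP_cons]
    by_cases h : p c
    · rw [if_pos h]
      intro piece hp
      rcases List.mem_cons.mp hp with hp | hp
      · simp [hp]
      · exact ih piece hp
    · rw [if_neg h]
      rcases hsp : List.splitOnP p t with _ | ⟨h0, t0⟩
      · exact absurd hsp (List.splitOnP_ne_nil _ _)
      · rw [List.modifyHead_cons]
        intro piece hp x hx
        rcases List.mem_cons.mp hp with hp | hp
        · subst hp
          rcases List.mem_cons.mp hx with hx | hx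
          · subst hx; exact Bool.eq_false_iff.mpr h
          · exact ih h0 (by simp [hsp]) x hx
        · exact ih piece (by simp [hsp, hp]) x hx

-- nested splits fuse
lemma flatMap_splitOnP (p q : Char → Bool) (l : List Char) :
    (List.splitOnP p l).flatMap (fun x => List.splitOnP q x) =
      List.splitOnP (fun c => p c || q c) l := by
  induction l with
  | nil => simp [List.splitOnP_nil]
  | cons c t ih =>
    rw [List.splitOnP_cons, List.splitOnP_cons]
    by_cases hp : p c
    · simp [hp, List.splitOnP_nil, ih]
    · rcases hsp : List.splitOnP p t with _ | ⟨h0, t0⟩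
      · exact absurd hsp (List.splitOnP_ne_nil _ _)
      · rw [if_neg hp]
        rw [List.modifyHead_cons, List.flatMap_cons, List.splitOnP_cons]
        by_cases hq : q c
        · rw [if_pos hq, if_pos (by simp [hq])]
          rw [← ih, hsp, List.flatMap_cons]
          simp
        · rw [if_neg hq, if_neg (by simp [hp, hq])]
          rw [← ih, hsp, List.flatMap_cons]
          rcases hsq : List.splitOnP q h0 with _ | ⟨g0, g1⟩
          · exact absurd hsq (List.splitOnP_ne_nil _ _)
          · simp

-- a map that fixes every non-delimiter is the identity on the split pieces
lemma map_fix_splitOnP (f : Char → Char) (hf : ∀ x, pvDelim x = false → f x = x) (l : List Char) :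
    (List.splitOnP pvDelim l).map (List.map f) = List.splitOnP pvDelim l := by
  have hfree := splitOnP_sep_free pvDelim l
  calc (List.splitOnP pvDelim l).map (List.map f)
      = (List.splitOnP pvDelim l).map id := by
        apply List.map_congr_left
        intro piece hp
        have : ∀ x ∈ piece, f x = x := fun x hx => hf x (hfree piece hp x hx)
        calc List.map f piece = List.map id piece := List.map_congr_left (fun x hx => this x hx)
          _ = piece := List.map_id piece
    _ = List.splitOnP pvDelim l := List.map_id _

-- pvRep2 does not change the kept segments
lemma keep_splitOnP_rep2 : ∀ cs : List Char,
    ∃ h A B, List.splitOnP pvDelim (pvRep2 cs) = h :: A ∧ List.splitOnP pvDelim cs = h :: B ∧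
      pvKeep A = pvKeep B := by
  intro cs
  induction cs using pvRep2.induct with
  | case1 => exact ⟨[], [], [], by simp [pvRep2, List.splitOnP_nil], by simp [List.splitOnP_nil], rfl⟩
  | case2 t ih =>
    obtain ⟨h', A', B', h1, h2, h3⟩ := ih
    refine ⟨[], List.splitOnP pvDelim (pvRep2 t), [] :: List.splitOnP pvDelim t, ?_, ?_, ?_⟩
    · show List.splitOnP pvDelim (pvRep2 ('\r' :: '\n' :: t)) = _
      rw [pvRep2]
      rw [List.splitOnP_cons, if_pos (by simp [pvDelim])]
    · rw [List.splitOnP_cons, if_pos (by simp [pvDelim]),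
        List.splitOnP_cons, if_pos (by simp [pvDelim])]
    · rw [h1, h2, pvKeep_cons, pvKeep_cons, pvKeep_cons]
      simp [strip_nil, h3]
  | case3 c t hne ih =>
    obtain ⟨h', A', B', h1, h2, h3⟩ := ih
    have hcons : pvRep2 (c :: t) = c :: pvRep2 t := by
      apply pvRep2_cons_ne
      rintro ⟨hc, hd⟩
      cases t with
      | nil => simp at hd
      | cons d t' => simp at hd; exact hne t' hc (by rw [hd])
    rw [hcons]
    by_cases hdc : pvDelim c
    · refine ⟨[], List.splitOnP pvDelim (pvRep2 t), List.splitOnP pvDelim t, ?_, ?_, ?_⟩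
      · rw [List.splitOnP_cons, if_pos hdc]
      · rw [List.splitOnP_cons, if_pos hdc]
      · rw [h1, h2, pvKeep_cons, pvKeep_cons, h3]
    · refine ⟨c :: h', A', B', ?_, ?_, h3⟩
      · rw [List.splitOnP_cons, if_neg (by simp [hdc]), h1, List.modifyHead_cons]
      · rw [List.splitOnP_cons, if_neg (by simp [hdc]), h2, List.modifyHead_cons]

lemma keep_rep2 (cs : List Char) :
    pvKeep (List.splitOnP pvDelim (pvRep2 cs)) = pvKeep (List.splitOnP pvDelim cs) := by
  obtain ⟨h, A, B, h1, h2, h3⟩ := keep_splitOnP_rep2 cs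
  rw [h1, h2, pvKeep_cons, pvKeep_cons, h3]

-- A's inner accumulator loop
lemma innerA (segs : List (List Char)) (parts : List String) :
    segs.foldl (fun parts segment =>
      let candidate := PySem.Chars.strip segment
      if candidate ≠ [] then parts ++ [String.ofList candidate] else parts) parts =
    parts ++ pvKeep segs := by
  induction segs generalizing parts with
  | nil => simp [pvKeep]
  | cons x L ih =>
    rw [List.foldl_cons, ih, pvKeep_cons]
    split_ifs with h <;> simp_all

-- A's nested accumulator loops compute pvKeep of the flattened split
lemma foldA_eq_keep (lines : List (List Char)) (parts : List String) :
    lines.foldl (fun parts line =>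
      (PySem.Chars.splitOn line [';']).foldl (fun parts segment =>
        let candidate := PySem.Chars.strip segment
        if candidate ≠ [] then parts ++ [String.ofList candidate] else parts) parts) parts =
    parts ++ pvKeep (lines.flatMap (fun line => PySem.Chars.splitOn line [';'])) := by
  induction lines generalizing parts with
  | nil => simp [pvKeep]
  | cons x L ih =>
    rw [List.foldl_cons, innerA, ih, List.flatMap_cons, pvKeep_append, List.append_assoc]

-- the delimiter predicate pulled back through A's second replace map
lemma pullback_A :
    (fun c => ((if c == '\r' then '\n' else c) == '\n' || (if c == '\r' then '\n' else c) == ';')) = pvDelim := by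
  funext c
  by_cases h : c = '\r'
  · simp [h, pvDelim]
  · have hc : (c == '\r') = false := by simp [h]
    simp [pvDelim, hc]

-- the final flush applied to a state
def pvFlush (st : List String × List Char) : List String :=
  if PySem.Chars.strip st.2 ≠ [] then st.1 ++ [String.ofList (PySem.Chars.strip st.2)] else st.1

-- B's state-machine loop computes pvKeep of the delimiter split, with the pending
-- accumulator prepended to the first piece
lemma foldB_eq_keep (l : List Char) (parts : List String) (cur : List Char) :
    pvFlush (l.foldl pvStepB (parts, cur)) =
      parts ++ pvKeep ((List.splitOnP pvDelim l).modifyHead (cur ++ ·)) := by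
  induction l generalizing parts cur with
  | nil =>
    simp only [List.foldl_nil, List.splitOnP_nil, List.modifyHead_cons, List.append_nil]
    rw [pvKeep_cons]
    show pvFlush (parts, cur) = _
    unfold pvFlush
    split_ifs with h <;> simp [pvKeep]
  | cons c t ih =>
    rw [List.foldl_cons, List.splitOnP_cons]
    by_cases hd : pvDelim c
    · have hstep : pvStepB (parts, cur) c =
          (if PySem.Chars.strip cur ≠ [] then parts ++ [String.ofList (PySem.Chars.strip cur)] else parts, []) := by
        unfold pvStepB
        rw [if_pos (by simpa [pvDelim] using hd)]
      rw [hstep, if_pos hd, ih, List.modifyHead_cons]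
      simp only [List.append_nil]
      rw [pvKeep_cons]
      have : (List.splitOnP pvDelim t).modifyHead (([] : List Char) ++ ·) = List.splitOnP pvDelim t :=
        congrFun List.modifyHead_id _
      rw [this]
      split_ifs with h <;> simp
    · have hstep : pvStepB (parts, cur) c = (parts, cur ++ [c]) := by
        unfold pvStepB
        rw [if_neg (by simpa [pvDelim] using hd)]
      rw [hstep, if_neg (by simpa using hd), ih]
      rcases hsp : List.splitOnP pvDelim t with _ | ⟨h0, t0⟩
      · exact absurd hsp (List.splitOnP_ne_nil _ _)
      · simp

-- ===== VERDICT (by name: the statement is the Claim_ definition above) =====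
theorem split_equation_inputs_py_spec : Claim_equal_split_equation_inputs_py := by
  intro text _
  show split_equation_inputs_py text = split_equation_inputs_py_alt text
  have hB : split_equation_inputs_py_alt text = pvKeep (List.splitOnP pvDelim text.toList) := by
    show pvFlush (text.toList.foldl pvStepB ([], [])) = _
    rw [foldB_eq_keep, List.nil_append]
    exact congrArg pvKeep (congrFun List.modifyHead_id _)
  rw [hB]
  simp only [split_equation_inputs_py]
  rw [replace_crlf, replace_single]
  rw [foldA_eq_keep, List.nil_append]
  have hinner : (fun line => PySem.Chars.splitOn line [';']) =
      (fun line => List.splitOnP (· == ';') line) := funext (fun l => splitOn_single l ';')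
  rw [hinner, splitOn_single, flatMap_splitOnP, splitOnP_map]
  show pvKeep _ = pvKeep _
  rw [show (fun c => ((fun x => x == '\n') (if c == '\r' then '\n' else c) ||
        (fun x => x == ';') (if c == '\r' then '\n' else c))) = pvDelim from pullback_A]
  rw [map_fix_splitOnP _ (by
    intro x hx
    simp [pvDelim] at hx
    simp [hx.1.1])]
  exact keep_rep2 text.toList
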